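-- pv_equiv track=rewrite | github.com/AverHLV/pairs | logs/helpers.py | process_log_strings
-- ===== SOURCE A (Python) =====
-- def process_log_strings(strings):
--     """ Mark given lines like blocks with newlines and color """
--
--     mark_as_red = False
--     appended_string = ''
--     processed_strings = []
--
--     for string in strings:
--         if len(string):
--             if 'Received task' in string:
--                 mark_as_red = False
--                 string = '<br/>' + string
--
--             if 'succeeded' in string:
--                 string = string + '<br/>'
--
--             if 'ERROR' in string:
--                 mark_as_red = True
--
--             if mark_as_red:
--                 string = '<font color="red">' + string + '</font>'
--
--             appended_string += string + '<br/>'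
--
--         else:
--             mark_as_red = False
--             processed_strings.append(appended_string)
--             appended_string = ''
--
--     processed_strings.append(appended_string)
--     return processed_strings
-- ===== SOURCE B (Python) =====
-- def _format_block(lines):
--     """Render one block of non-empty log lines as a single HTML string."""
--     mark_as_red = False
--     html = ''
--     for line in lines:
--         if 'Received task' in line:
--             mark_as_red = False
--             line = '<br/>' + line
--         if 'succeeded' in line:
--             line = line + '<br/>'
--         if 'ERROR' in line:
--             mark_as_red = True
--         if mark_as_red:
--             line = '<font color="red">' + line + '</font>'
--         html += line + '<br/>'
--     return html
--
--
-- def process_log_strings(strings):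
--     """ Mark given lines like blocks with newlines and color """
--     blocks = []
--     current = []
--     for s in strings:
--         if s == '':
--             blocks.append(current)
--             current = []
--         else:
--             current.append(s)
--     blocks.append(current)
--     return [_format_block(block) for block in blocks]
-- ===== Notes on version B (the rewrite author's own statement) =====
-- stated objective: simpler
-- what changed: B first splits the input into blocks at the empty-string delimiters, then renders each block independently with a local red flag and joins its formatted lines, instead of A's single pass that threads one mutable (flag, buffer, output) state across the whole list.
import Mathlib
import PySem

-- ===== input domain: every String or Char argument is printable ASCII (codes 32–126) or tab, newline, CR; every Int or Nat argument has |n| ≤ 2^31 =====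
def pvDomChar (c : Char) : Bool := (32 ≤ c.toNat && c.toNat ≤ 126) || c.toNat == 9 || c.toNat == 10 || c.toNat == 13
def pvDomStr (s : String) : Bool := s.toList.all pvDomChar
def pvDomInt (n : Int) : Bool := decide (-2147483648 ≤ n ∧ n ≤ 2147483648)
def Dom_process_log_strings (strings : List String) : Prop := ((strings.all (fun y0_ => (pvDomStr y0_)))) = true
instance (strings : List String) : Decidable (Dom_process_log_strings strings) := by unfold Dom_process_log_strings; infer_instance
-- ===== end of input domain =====

-- B splits the input into blocks at the empty-string delimiters and renders each block
-- independently, instead of A's single pass threading one (flag, buffer, output) state.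

-- ===== PORT A =====
-- one iteration of A's loop over (mark_as_red, appended_string, processed_strings)
def pvAStep (st : Bool × String × List String) (s : String) : Bool × String × List String :=
  if PySem.Str.len s ≠ 0 then
    let p1 := if PySem.Str.isIn "Received task" s then (false, "<br/>" ++ s) else (st.1, s)
    let s2 := if PySem.Str.isIn "succeeded" p1.2 then p1.2 ++ "<br/>" else p1.2
    let mark := if PySem.Str.isIn "ERROR" s2 then true else p1.1
    let s3 := if mark then "<font color=\"red\">" ++ s2 ++ "</font>" else s2
    (mark, st.2.1 ++ (s3 ++ "<br/>"), st.2.2)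
  else
    (false, "", st.2.2 ++ [st.2.1])

def process_log_strings (strings : List String) : List String :=
  let st := strings.foldl pvAStep (false, "", ([] : List String))
  st.2.2 ++ [st.2.1]

-- ===== PORT B =====
-- one iteration of _format_block's loop over (mark_as_red, html)
def pvFmtStep (st : Bool × String) (s : String) : Bool × String :=
  let p1 := if PySem.Str.isIn "Received task" s then (false, "<br/>" ++ s) else (st.1, s)
  let s2 := if PySem.Str.isIn "succeeded" p1.2 then p1.2 ++ "<br/>" else p1.2
  let mark := if PySem.Str.isIn "ERROR" s2 then true else p1.1
  let s3 := if mark then "<font color=\"red\">" ++ s2 ++ "</font>" else s2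
  (mark, st.2 ++ (s3 ++ "<br/>"))

def pvFormatBlock (lines : List String) : String :=
  (lines.foldl pvFmtStep (false, "")).2

-- one iteration of B's splitting loop over (blocks, current)
def pvSplitStep (st : List (List String) × List String) (s : String) : List (List String) × List String :=
  if s = "" then (st.1 ++ [st.2], []) else (st.1, st.2 ++ [s])

def process_log_strings_alt (strings : List String) : List String :=
  let r := strings.foldl pvSplitStep ([], [])
  (r.1 ++ [r.2]).map pvFormatBlock

-- ===== PRECONDITION & SPEC =====
def Spec_process_log_strings (strings : List String) (out : List String) : Prop := out = process_log_strings_alt strings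
instance (strings : List String) (out : List String) : Decidable (Spec_process_log_strings strings out) := by unfold Spec_process_log_strings; infer_instance

-- ===== CLAIM (what is proved, stated in full; the proofs are below) =====
def Claim_equal_process_log_strings : Prop := ∀ (strings : List String), Dom_process_log_strings strings → Spec_process_log_strings strings (process_log_strings strings)

-- ===== LEMMAS AND PROOFS =====

theorem pvStr_len_ne_zero_iff (s : String) : (PySem.Str.len s ≠ 0) ↔ s ≠ "" := by
  simp [PySem.Str.len_eq]

-- A's nonempty-branch equals one pvFmtStep composed onto the buffer
theorem pvAStep_nonempty (st : Bool × String × List String) (s : String) (h : s ≠ "") :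
    pvAStep st s = ((pvFmtStep (st.1, st.2.1) s).1, (pvFmtStep (st.1, st.2.1) s).2, st.2.2) := by
  have : PySem.Str.len s ≠ 0 := (pvStr_len_ne_zero_iff s).mpr h
  simp only [pvAStep, pvFmtStep, if_pos this]

theorem pvAStep_empty (st : Bool × String × List String) :
    pvAStep st "" = (false, "", st.2.2 ++ [st.2.1]) := by
  simp [pvAStep, PySem.Str.len_eq]

-- main invariant: A's loop from a mid-block state = B's split-then-format
theorem pvMain (l : List String) : ∀ (gs : List (List String)) (cur : List String),
    (let st := l.foldl pvAStep ((cur.foldl pvFmtStep (false, "")).1,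
                               (cur.foldl pvFmtStep (false, "")).2,
                               gs.map pvFormatBlock)
     st.2.2 ++ [st.2.1])
    = (let r := l.foldl pvSplitStep (gs, cur)
       (r.1 ++ [r.2]).map pvFormatBlock) := by
  induction l with
  | nil =>
    intro gs cur
    simp [pvFormatBlock]
  | cons s t ih =>
    intro gs cur
    by_cases hs : s = ""
    · subst hs
      simp only [List.foldl_cons, pvAStep_empty, pvSplitStep]
      have := ih (gs ++ [cur]) []
      simpa [pvFormatBlock] using this
    · simp only [List.foldl_cons, pvAStep_nonempty _ _ hs, pvSplitStep, if_neg hs]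
      have hfold : (cur ++ [s]).foldl pvFmtStep (false, "") = pvFmtStep (cur.foldl pvFmtStep (false, "")) s := by
        simp
      have := ih gs (cur ++ [s])
      rw [hfold] at this
      simpa using this

-- ===== VERDICT (by name: the statement is the Claim_ definition above) =====
theorem process_log_strings_spec : Claim_equal_process_log_strings := by
  intro strings _
  unfold Spec_process_log_strings process_log_strings process_log_strings_alt
  have := pvMain strings [] []
  simpa using this
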